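-- pv_equiv track=rewrite | github.com/tyrocca/dailyprogrammer | intermediate/challenge_245.py | alien_to_english
-- ===== SOURCE A (Python) =====
-- def alien_to_english(key_string):
--     """
--     function that takes in the key string and makes a lookup dictionary
--     for the string
--     """
--     letter = None
--     letter_to_dict = {}
--     for i, item in enumerate(key_string.split(" ")):
--         if i % 2 == 0:
--             letter = item
--         else:
--             letter_to_dict[item] = letter
--     return letter_to_dict
-- ===== SOURCE B (Python) =====
-- def alien_to_english(key_string):
--     """
--     function that takes in the key string and makes a lookup dictionary
--     for the string
--     """
--     # Single character-level state machine: no split(), tokens are cut at each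
--     # space on the fly and alternately treated as letter / alien word.
--     letter_to_dict = {}
--     letter = ""
--     buf = []
--     odd = False
--     for ch in key_string:
--         if ch == " ":
--             tok = "".join(buf)
--             if odd:
--                 letter_to_dict[tok] = letter
--             else:
--                 letter = tok
--             buf = []
--             odd = not odd
--         else:
--             buf.append(ch)
--     if odd:
--         letter_to_dict["".join(buf)] = letter
--     return letter_to_dict
-- ===== Notes on version B (the rewrite author's own statement) =====
-- stated objective: alternative
-- what changed: Replaces split()+enumerate with an i % 2 branch by a single character-level state machine that never builds a token list: tokens are cut at each space on the fly into a buffer and alternately stored as the pending letter or inserted as a word key, with a final flush for the dangling token.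
import Mathlib
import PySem

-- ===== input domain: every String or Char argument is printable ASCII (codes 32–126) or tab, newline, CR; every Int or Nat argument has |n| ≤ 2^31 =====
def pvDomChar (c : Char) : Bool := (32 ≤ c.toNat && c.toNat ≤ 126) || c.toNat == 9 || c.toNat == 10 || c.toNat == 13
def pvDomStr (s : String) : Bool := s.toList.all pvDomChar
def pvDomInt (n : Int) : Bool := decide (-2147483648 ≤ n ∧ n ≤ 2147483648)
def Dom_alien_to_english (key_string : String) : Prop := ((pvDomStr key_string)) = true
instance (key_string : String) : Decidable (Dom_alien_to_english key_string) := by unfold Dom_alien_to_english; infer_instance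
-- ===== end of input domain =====

-- B replaces split()+enumerate with i % 2 by a single character-level state machine:
-- tokens are cut at each space on the fly and alternately used as letter / word key.

-- ===== PORT A =====
-- A's loop state: (letter : Option String, dict); Python's `letter = None` is `none`.
-- The `none` letter can never be inserted (index 0 is even), so `.getD ""` below is dead code.
def alien_to_english (key_string : String) : List (String × String) :=
  let toks := (PySem.Str.split? key_string " ").getD []
  let res := (PySem.List.enumerate toks 0).foldl
    (fun (st : Option String × PySem.Dict String String) p =>
      if p.1 % 2 == 0 then (some p.2, st.2)
      else (st.1, st.2.insert p.2 (st.1.getD "")))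
    (none, PySem.Dict.empty)
  res.2.items

-- ===== PORT B =====
-- state: (dict, letter, buf, odd); `ch == ' '` cuts the buffered token and
-- alternately inserts it (odd) or stores it as the pending letter (even);
-- after the loop the dangling token is flushed if it sits at an odd position.
def alien_to_english_alt (key_string : String) : List (String × String) :=
  let st := key_string.toList.foldl
    (fun (st : PySem.Dict String String × String × List Char × Bool) ch =>
      if ch == ' ' then
        let tok := String.ofList st.2.2.1
        if st.2.2.2 then (st.1.insert tok st.2.1, st.2.1, [], !st.2.2.2)
        else (st.1, tok, [], !st.2.2.2)
      else (st.1, st.2.1, st.2.2.1 ++ [ch], st.2.2.2))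
    (PySem.Dict.empty, "", [], false)
  (if st.2.2.2 then st.1.insert (String.ofList st.2.2.1) st.2.1 else st.1).items

-- ===== PRECONDITION & SPEC =====
def Spec_alien_to_english (key_string : String) (out : List (String × String)) : Prop := out = alien_to_english_alt key_string
instance (key_string : String) (out : List (String × String)) : Decidable (Spec_alien_to_english key_string out) := by unfold Spec_alien_to_english; infer_instance

-- ===== CLAIM =====
def Claim_equal_alien_to_english : Prop := ∀ (key_string : String), Dom_alien_to_english key_string → Spec_alien_to_english key_string (alien_to_english key_string)

-- ===== LEMMAS AND PROOFS =====

-- reference splitter on chars: (first token, remaining tokens)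
def pvSplit : List Char → List Char × List (List Char)
  | [] => ([], [])
  | c :: cs =>
    let p := pvSplit cs
    if c = ' ' then ([], p.1 :: p.2) else (c :: p.1, p.2)

-- two-at-a-time structural recursion skeleton (for its .induct principle)
def pvTwo : List String → Unit
  | _ :: _ :: rest => pvTwo rest
  | _ => ()

-- the common token-level step: parity bool instead of the index
def pvTokStep (st : PySem.Dict String String × String × Bool) (tok : String) :
    PySem.Dict String String × String × Bool :=
  if st.2.2 then (st.1.insert tok st.2.1, st.2.1, false) else (st.1, tok, true)

theorem pv_splitOn_go_eq (fuel : Nat) (l cur : List Char) (acc : List (List Char))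
    (h : l.length ≤ fuel) :
    PySem.Chars.splitOn.go [' '] fuel l cur acc
      = acc.reverse ++ (cur.reverse ++ (pvSplit l).1) :: (pvSplit l).2 := by
  induction fuel generalizing l cur acc with
  | zero =>
      match l, h with
      | [], _ => simp [PySem.Chars.splitOn.go, pvSplit]
  | succ f ih =>
      match l with
      | [] => simp [PySem.Chars.splitOn.go, pvSplit]
      | c :: rest =>
          rw [PySem.Chars.splitOn.go]
          have hlen : rest.length ≤ f := by simpa using Nat.lt_succ_iff.mp (by simpa using h)
          by_cases hc : c = ' '
          · subst hc
            have hp : [' '].isPrefixOf (' ' :: rest) = true := by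
              simp [List.isPrefixOf]
            rw [if_pos hp]
            simp only [List.length_singleton, List.drop_succ_cons, List.drop_zero]
            rw [ih rest [] (cur.reverse :: acc) hlen]
            simp [pvSplit]
          · have hp : ¬ ([' '].isPrefixOf (c :: rest) = true) := by
              simp [List.isPrefixOf]
              exact fun h' => hc h'.symm
            rw [if_neg hp]
            rw [ih rest (c :: cur) acc hlen]
            simp [pvSplit, hc]

theorem pv_splitOn_eq (cs : List Char) :
    PySem.Chars.splitOn cs [' '] = (pvSplit cs).1 :: (pvSplit cs).2 := by
  unfold PySem.Chars.splitOn
  rw [pv_splitOn_go_eq (cs.length + 1) cs [] [] (Nat.le_succ _)]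
  simp

-- A's enumerated fold from an even index is the parity-bool token fold.
theorem pv_A_fold_eq (toks : List String) (s : Int) (hs : s % 2 = 0)
    (l : Option String) (d : PySem.Dict String String) :
    ((PySem.List.enumerate toks s).foldl
      (fun (st : Option String × PySem.Dict String String) p =>
        if p.1 % 2 == 0 then (some p.2, st.2)
        else (st.1, st.2.insert p.2 (st.1.getD "")))
      (l, d)).2
    = (toks.foldl pvTokStep (d, l.getD "", false)).1 := by
  induction toks using pvTwo.induct generalizing s l d with
  | case1 a b rest ih =>
      have h1 : ((s : Int) % 2 == 0) = true := by simp [hs]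
      have h2 : (((s + 1 : Int)) % 2 == 0) = false := by
        simp only [beq_eq_false_iff_ne, ne_eq]; omega
      simp only [PySem.List.enumerate_cons, List.foldl_cons, h1, h2, if_true]
      rw [ih (s + 1 + 1) (by omega)]
      simp [pvTokStep]
  | case2 x h =>
      match x with
      | [] => simp [PySem.List.enumerate]
      | [a] =>
          have h2 : (2 : Int) ∣ s := Int.dvd_of_emod_eq_zero hs
          simp [PySem.List.enumerate, h2, pvTokStep]
      | a :: b :: rest => exact (h a b rest rfl).elim

-- B's character fold followed by the final flush is the token fold over pvSplit.
theorem pv_B_fold_eq (cs : List Char) (d : PySem.Dict String String)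
    (l : String) (buf : List Char) (odd : Bool) :
    (let st := cs.foldl
        (fun (st : PySem.Dict String String × String × List Char × Bool) ch =>
          if ch == ' ' then
            let tok := String.ofList st.2.2.1
            if st.2.2.2 then (st.1.insert tok st.2.1, st.2.1, [], !st.2.2.2)
            else (st.1, tok, [], !st.2.2.2)
          else (st.1, st.2.1, st.2.2.1 ++ [ch], st.2.2.2))
        (d, l, buf, odd)
      if st.2.2.2 then st.1.insert (String.ofList st.2.2.1) st.2.1 else st.1)
    = ((((buf ++ (pvSplit cs).1) :: (pvSplit cs).2).map String.ofList).foldl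
        pvTokStep (d, l, odd)).1 := by
  induction cs generalizing d l buf odd with
  | nil => cases odd <;> simp [pvSplit, pvTokStep]
  | cons c rest ih =>
      by_cases hc : c = ' '
      · subst hc
        cases odd <;>
          simp only [List.foldl_cons, beq_self_eq_true, if_true, pvSplit] <;>
          rw [ih] <;>
          simp [pvTokStep]
      · have hb : (c == ' ') = false := by simp [hc]
        simp only [List.foldl_cons, hb, Bool.false_eq_true, if_false]
        rw [ih]
        simp [pvSplit, hc, List.append_assoc]

-- ===== VERDICT =====
theorem alien_to_english_spec : Claim_equal_alien_to_english := by
  intro ks _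
  unfold Spec_alien_to_english alien_to_english alien_to_english_alt
  dsimp only
  rw [pv_A_fold_eq _ 0 (by decide), pv_B_fold_eq]
  have htoks : (PySem.Str.split? ks " ").getD []
      = ((pvSplit ks.toList).1 :: (pvSplit ks.toList).2).map String.ofList := by
    simp [PySem.Str.split?, PySem.Chars.split?, pv_splitOn_eq]
  rw [htoks]
  simp
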